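-- pv_equiv track=rewrite | github.com/ajaykr2712/Qos-Visualizer | Flask/Conversion.py | compare_lines_with_dict
-- ===== SOURCE A (Python) =====
-- def compare_lines_with_dict(input_text, dictionary):
--  lines = input_text.split('\n')
--  matching_values = []
--  for line in lines:
--     matching_value = ""
--     found_match=False
--     for key in dictionary:
--      if key in line:
--        matching_value += dictionary[key]
--        found_match=True
--        break
--     if found_match==False:
--        matching_value += "NOT-FOUND"
--
--     matching_values.append(matching_value)
--     ans=matching_values[0:]
--     answer="\n".join(ans)
--  return answer
-- ===== SOURCE B (Python) =====
-- def compare_lines_with_dict(input_text, dictionary):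
--     # Key-major pass: for each dictionary key in order, resolve the still-unmatched
--     # lines that contain it; the result list is joined once at the end.
--     lines = input_text.split('\n')
--     res = [None] * len(lines)
--     remaining = list(range(len(lines)))
--     for key, value in dictionary.items():
--         still = []
--         for i in remaining:
--             if key in lines[i]:
--                 res[i] = value
--             else:
--                 still.append(i)
--         remaining = still
--     return '\n'.join(v if v is not None else "NOT-FOUND" for v in res)
-- ===== Notes on version B (the rewrite author's own statement) =====
-- stated objective: alternative
-- what changed: B replaces A's line-major scan (which rebuilds the joined answer string after every line) by a key-major sweep that keeps the list of still-unmatched line indices per dictionary key and joins the result list exactly once.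
import Mathlib
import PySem

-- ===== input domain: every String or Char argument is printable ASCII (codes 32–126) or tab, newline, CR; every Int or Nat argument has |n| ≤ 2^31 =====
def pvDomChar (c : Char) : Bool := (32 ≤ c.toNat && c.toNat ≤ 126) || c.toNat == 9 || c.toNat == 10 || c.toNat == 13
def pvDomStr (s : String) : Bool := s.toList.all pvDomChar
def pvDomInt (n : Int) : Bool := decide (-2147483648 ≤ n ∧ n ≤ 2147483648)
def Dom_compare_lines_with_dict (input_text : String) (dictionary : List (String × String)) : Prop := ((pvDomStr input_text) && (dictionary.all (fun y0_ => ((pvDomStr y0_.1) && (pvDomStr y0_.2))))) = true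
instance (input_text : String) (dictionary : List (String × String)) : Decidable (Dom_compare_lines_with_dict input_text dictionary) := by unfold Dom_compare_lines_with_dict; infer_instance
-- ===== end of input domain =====

-- B is a key-major sweep over the still-unmatched line indices with a single final join;
-- A is line-major and re-joins the whole result list after every line.

-- ===== PORT A =====
-- inner 'for key in dictionary: if key in line: matching_value += dictionary[key]; break'
def pvInnerA (d : PySem.Dict String String) (line : String) : List String → String × Bool
  | [] => ("", false)
  | k :: ks =>
    if PySem.Str.isIn k line then (PySem.Dict.getD d k "", true)
    else pvInnerA d line ks

-- body of 'for line in lines' (state: matching_values, answer)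
def pvStepA (d : PySem.Dict String String) (st : List String × String) (line : String) :
    List String × String :=
  let r := pvInnerA d line (PySem.Dict.keys d)
  let matching_value := if r.2 then "" ++ r.1 else "" ++ "NOT-FOUND"
  let matching_values := st.1 ++ [matching_value]
  let ans := PySem.List.slice matching_values none none
  (matching_values, PySem.Str.join "\n" ans)

-- 'answer' starts undefined in Python; lines = split(...) is never empty, so the
-- initial "" below is never returned.
def compare_lines_with_dict (input_text : String) (dictionary : List (String × String)) : String :=
  let lines := (PySem.Str.split? input_text "\n").getD []  -- sep "\n" ≠ "", so split? is always some
  let d := PySem.Dict.ofList dictionary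
  (lines.foldl (pvStepA d) ([], "")).2

-- ===== PORT B =====
-- inner 'for i in remaining: if key in lines[i]: res[i] = value else still.append(i)'
def pvStepB (lines : List String) (st : List (Option String) × List Nat)
    (kv : String × String) : List (Option String) × List Nat :=
  st.2.foldl
    (fun acc i =>
      if PySem.Str.isIn kv.1 (lines.getD i "") then (acc.1.set i (some kv.2), acc.2)
      else (acc.1, acc.2 ++ [i]))
    (st.1, [])

def compare_lines_with_dict_alt (input_text : String) (dictionary : List (String × String)) : String :=
  let lines := (PySem.Str.split? input_text "\n").getD []  -- sep "\n" ≠ "", so split? is always some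
  let items := (PySem.Dict.ofList dictionary).items
  let res := (items.foldl (pvStepB lines) (lines.map (fun _ => (none : Option String)), List.range lines.length)).1
  PySem.Str.join "\n" (res.map (fun o => o.getD "NOT-FOUND"))

-- ===== PRECONDITION & SPEC =====
def Spec_compare_lines_with_dict (input_text : String) (dictionary : List (String × String)) (out : String) : Prop := out = compare_lines_with_dict_alt input_text dictionary
instance (input_text : String) (dictionary : List (String × String)) (out : String) : Decidable (Spec_compare_lines_with_dict input_text dictionary out) := by unfold Spec_compare_lines_with_dict; infer_instance

-- ===== CLAIM (what is proved, stated in full; the proofs are below) =====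
def Claim_equal_compare_lines_with_dict : Prop := ∀ (input_text : String) (dictionary : List (String × String)), Dom_compare_lines_with_dict input_text dictionary → Spec_compare_lines_with_dict input_text dictionary (compare_lines_with_dict input_text dictionary)

-- ===== LEMMAS AND PROOFS =====

-- value of the first item whose key occurs in line
def pvFirst (ps : List (String × String)) (line : String) : Option String :=
  (ps.find? (fun p => PySem.Chars.isIn p.1.toList line.toList)).map (·.2)

theorem pvFirst_nil (line : String) : pvFirst [] line = none := rfl

theorem pvFirst_cons (p : String × String) (ps : List (String × String)) (line : String) :
    pvFirst (p :: ps) line =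
      if PySem.Chars.isIn p.1.toList line.toList = true then some p.2 else pvFirst ps line := by
  unfold pvFirst
  rw [List.find?_cons]
  by_cases h : PySem.Chars.isIn p.1.toList line.toList = true <;> simp [h]

-- A's inner loop over the keys of d computes pvFirst of d's items
theorem pvInnerA_eq (d : PySem.Dict String String) (line : String)
    (ps : List (String × String)) (hv : ∀ p ∈ ps, PySem.Dict.getD d p.1 "" = p.2) :
    pvInnerA d line (ps.map (·.1)) =
      match pvFirst ps line with
      | some v => (v, true)
      | none => ("", false) := by
  induction ps with
  | nil => rfl
  | cons p ps ih =>
    simp only [List.map, pvInnerA, pvFirst_cons]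
    by_cases h : PySem.Chars.isIn p.1.toList line.toList = true
    · simp [h, hv p (by simp)]
    · simp [h, ih (fun q hq => hv q (by simp [hq]))]

-- per-line value produced by A
def pvLineVal (items : List (String × String)) (line : String) : String :=
  (pvFirst items line).getD "NOT-FOUND"

theorem pvStepA_eq (dictionary : List (String × String)) (st : List String × String)
    (line : String) :
    pvStepA (PySem.Dict.ofList dictionary) st line =
      (st.1 ++ [pvLineVal (PySem.Dict.ofList dictionary).items line],
       PySem.Str.join "\n" (st.1 ++ [pvLineVal (PySem.Dict.ofList dictionary).items line])) := by
  have hnd : ((PySem.Dict.ofList dictionary).keys).Nodup := PySem.Dict.nodup_keys_ofList dictionary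
  have hv : ∀ p ∈ (PySem.Dict.ofList dictionary).items,
      PySem.Dict.getD (PySem.Dict.ofList dictionary) p.1 "" = p.2 := by
    intro p hp
    exact PySem.Dict.getD_of_mem_items _ (by simpa using hp) hnd ""
  have hkeys : (PySem.Dict.ofList dictionary).keys =
      (PySem.Dict.ofList dictionary).items.map (·.1) := rfl
  have htake : ∀ (l : List String) (x : String),
      List.take (l.length + 1) (l ++ [x]) = l ++ [x] := by
    intro l x; exact List.take_of_length_le (by simp)
  unfold pvStepA
  rw [hkeys, pvInnerA_eq _ _ _ hv]
  cases h : pvFirst (PySem.Dict.ofList dictionary).items line <;>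
    simp [pvLineVal, h, PySem.List.slice, htake]

-- A's outer loop: the accumulated values and the (re-)joined answer
theorem pvFoldA (dictionary : List (String × String)) (l : List String)
    (acc : List String) (ans : String) :
    l.foldl (pvStepA (PySem.Dict.ofList dictionary)) (acc, ans) =
      (acc ++ l.map (pvLineVal (PySem.Dict.ofList dictionary).items),
       if l = [] then ans
       else PySem.Str.join "\n" (acc ++ l.map (pvLineVal (PySem.Dict.ofList dictionary).items))) := by
  induction l generalizing acc ans with
  | nil => simp
  | cons x xs ih =>
    simp only [List.foldl, pvStepA_eq, ih, List.map]
    cases xs <;> simp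

-- B's inner loop (one key over the remaining indices)
theorem pvInnerB (lines : List String) (k v : String) (rem : List Nat)
    (res : List (Option String)) (s0 : List Nat)
    (hlen : ∀ i ∈ rem, i < res.length) :
    rem.foldl
      (fun acc i =>
        if PySem.Str.isIn k (lines.getD i "") then (acc.1.set i (some v), acc.2)
        else (acc.1, acc.2 ++ [i])) (res, s0) =
      ((List.range res.length).map (fun j =>
          if j ∈ rem ∧ PySem.Chars.isIn k.toList (lines.getD j "").toList = true then some v
          else res.getD j none),
       s0 ++ rem.filter (fun i => !PySem.Chars.isIn k.toList (lines.getD i "").toList)) := by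
  induction rem generalizing res s0 with
  | nil =>
    simp only [List.foldl, List.filter_nil, List.append_nil]
    refine Prod.ext ?_ rfl
    apply List.ext_getElem
    · simp
    · intro j hj hj2
      have hj' : j < res.length := by simpa using hj
      simp [List.getElem?_eq_getElem hj']
  | cons i rem ih =>
    simp only [List.foldl]
    have hil : i < res.length := hlen i (by simp)
    by_cases h : PySem.Chars.isIn k.toList (lines[i]?.getD "").toList = true
    · rw [if_pos (by simp only [PySem.Str.isIn_eq, List.getD_eq_getElem?_getD]; exact h)]
      rw [ih (res.set i (some v)) s0 (by simpa using fun j hj => hlen j (.tail _ hj))]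
      refine Prod.ext ?_ ?_
      · apply List.ext_getElem
        · simp
        · intro j hj hj2
          have hj' : j < res.length := by simpa using hj2
          simp only [List.getElem_map, List.getElem_range, List.length_set,
            List.getD_eq_getElem?_getD, List.mem_cons]
          by_cases hin : PySem.Chars.isIn k.toList (lines[j]?.getD "").toList = true
          · by_cases hji : j = i
            · subst hji
              simp [hin, hj']
            · have hij : ¬ i = j := fun e => hji e.symm
              by_cases hjr : j ∈ rem <;> simp [hin, hji, hjr, hij]
          · have hji : ¬ j = i := fun e => hin (by rw [e]; exact h)
            have hij : ¬ i = j := fun e => hji e.symm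
            simp [hin, hij]
      · rw [List.filter_cons_of_neg (by simp [List.getD_eq_getElem?_getD, h])]
    · rw [if_neg (by simp only [PySem.Str.isIn_eq, List.getD_eq_getElem?_getD]; exact h)]
      rw [ih res (s0 ++ [i]) (fun j hj => hlen j (.tail _ hj))]
      refine Prod.ext ?_ ?_
      · apply List.ext_getElem
        · simp
        · intro j hj hj2
          have hj' : j < res.length := by simpa using hj2
          simp only [List.getElem_map, List.getElem_range, List.getD_eq_getElem?_getD,
            List.mem_cons]
          by_cases hin : PySem.Chars.isIn k.toList (lines[j]?.getD "").toList = true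
          · have hji : ¬ j = i := fun e => h (by rw [← e]; exact hin)
            by_cases hjr : j ∈ rem <;> simp [hin, hji, hjr]
          · simp [hin]
      · rw [List.filter_cons_of_pos (by simp [List.getD_eq_getElem?_getD, h])]
        simp

-- B's outer loop: res holds pvFirst of the processed items on the remaining indices
theorem pvFoldB (lines : List String) (ps : List (String × String))
    (res : List (Option String)) (rem : List Nat)
    (hlen : ∀ i ∈ rem, i < res.length) :
    ps.foldl (pvStepB lines) (res, rem) =
      ((List.range res.length).map (fun j =>
          if j ∈ rem ∧ (pvFirst ps (lines.getD j "")).isSome then pvFirst ps (lines.getD j "")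
          else res.getD j none),
       rem.filter (fun i => (pvFirst ps (lines.getD i "")).isNone)) := by
  induction ps generalizing res rem with
  | nil =>
    simp only [List.foldl, pvFirst_nil]
    refine Prod.ext ?_ ?_
    · apply List.ext_getElem
      · simp
      · intro j hj hj2
        have hj' : j < res.length := by simpa using hj2
        simp [List.getElem?_eq_getElem hj']
    · simp
  | cons p ps ih =>
    simp only [List.foldl]
    have hstep : pvStepB lines (res, rem) p =
        ((List.range res.length).map (fun j =>
            if j ∈ rem ∧ PySem.Chars.isIn p.1.toList (lines.getD j "").toList = true then some p.2
            else res.getD j none),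
         rem.filter (fun i => !PySem.Chars.isIn p.1.toList (lines.getD i "").toList)) := by
      unfold pvStepB
      exact pvInnerB lines p.1 p.2 rem res [] hlen
    rw [hstep, ih _ _ (by
      intro i hi
      simp only [List.length_map, List.length_range]
      exact hlen i (List.mem_of_mem_filter hi))]
    refine Prod.ext ?_ ?_
    · simp only [List.length_map, List.length_range]
      apply List.ext_getElem
      · simp
      · intro j hj hj2
        have hj' : j < res.length := by simpa using hj2
        simp only [List.getElem_map, List.getElem_range, List.getD_eq_getElem?_getD,
          List.mem_filter, pvFirst_cons]
        by_cases h1 : PySem.Chars.isIn p.1.toList (lines[j]?.getD "").toList = true <;>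
          by_cases hjr : j ∈ rem <;>
            simp [h1, hjr, hj']
    · simp only [List.filter_filter, pvFirst_cons]
      congr 1
      funext i
      by_cases h1 : PySem.Chars.isIn p.1.toList (lines[i]?.getD "").toList = true <;>
        simp [List.getD_eq_getElem?_getD, h1]

-- B's res list, fully evaluated
theorem pvResB (lines : List String) (ps : List (String × String)) :
    (ps.foldl (pvStepB lines) (lines.map (fun _ => (none : Option String)), List.range lines.length)).1 =
      lines.map (fun line => pvFirst ps line) := by
  rw [pvFoldB lines ps _ _ (by simp)]
  apply List.ext_getElem
  · simp
  · intro j hj hj2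
    have hj' : j < lines.length := by simpa using hj2
    simp only [List.getElem_map, List.getElem_range, List.length_map]
    have hline : lines.getD j "" = lines[j] := List.getD_eq_getElem lines "" hj'
    have hgetD : (lines.map (fun _ => (none : Option String))).getD j none = none := by
      rw [List.getD_eq_getElem _ _ (by simpa using hj')]
      simp
    rw [hline, hgetD]
    by_cases h : (pvFirst ps lines[j]).isSome
    · simp [hj', h]
    · have hnone : pvFirst ps lines[j] = none := by
        cases hx : pvFirst ps lines[j] <;> simp_all
      simp [hj', hnone]

-- ===== VERDICT (by name: the statement is the Claim_ definition above) =====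
theorem compare_lines_with_dict_spec : Claim_equal_compare_lines_with_dict := by
  intro input_text dictionary _
  unfold Spec_compare_lines_with_dict compare_lines_with_dict compare_lines_with_dict_alt
  simp only [pvFoldA, pvResB, List.nil_append, List.map_map]
  cases h : (PySem.Str.split? input_text "\n").getD [] with
  | nil => simp [PySem.Str.join, PySem.Chars.join, List.intercalate]
  | cons x xs =>
    simp only [if_neg (by simp : ¬ (x :: xs = []))]
    rfl
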